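-- pv_equiv track=rewrite | github.com/Nacho-Alvarez0412/Visualizacion-PRY1-Visualizacion-de-Arboles | PythonVisualizations/visualizations/transformations.py | add_section_values
-- ===== SOURCE A (Python) =====
-- def add_section_values(values_list, section_values):
--     """Calculates the trade value of the section and each of its hs2 groups
--
--     :param values_list: The list that contains all of the trade values from all sections
--     :param section_values: A matrix that has the trade values of each hs2 group and its products
--     :return: The trade value of the whole section
--     """
--     new_values = []
--     total_section_trades = 0
--
--     for hs2_group in section_values:
--         new_values.append(sum(hs2_group))
--         total_section_trades += sum(hs2_group)
--         for trade_value in hs2_group: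
--             new_values.append(trade_value)
--
--     values_list.append(total_section_trades)
--     values_list.extend(new_values)
--
--     return total_section_trades
-- ===== SOURCE B (Python) =====
-- def add_section_values(values_list, section_values):
--     """Recursive re-implementation: builds the appended segment structurally,
--     back-to-front, and extends values_list once."""
--     def segment(groups):
--         if not groups:
--             return 0, []
--         rest_total, rest_seg = segment(groups[1:])
--         s = sum(groups[0])
--         return s + rest_total, [s, *groups[0], *rest_seg]
--
--     total, seg = segment(section_values)
--     values_list.append(total)
--     values_list.extend(seg)
--     return total
-- ===== Notes on version B (the rewrite author's own statement) =====
-- stated objective: alternative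
-- what changed: B replaces A's iterative accumulation into a mutable buffer by structural recursion over section_values that returns (total, segment) pairs, assembling the output back-to-front and extending values_list once.
import Mathlib
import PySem

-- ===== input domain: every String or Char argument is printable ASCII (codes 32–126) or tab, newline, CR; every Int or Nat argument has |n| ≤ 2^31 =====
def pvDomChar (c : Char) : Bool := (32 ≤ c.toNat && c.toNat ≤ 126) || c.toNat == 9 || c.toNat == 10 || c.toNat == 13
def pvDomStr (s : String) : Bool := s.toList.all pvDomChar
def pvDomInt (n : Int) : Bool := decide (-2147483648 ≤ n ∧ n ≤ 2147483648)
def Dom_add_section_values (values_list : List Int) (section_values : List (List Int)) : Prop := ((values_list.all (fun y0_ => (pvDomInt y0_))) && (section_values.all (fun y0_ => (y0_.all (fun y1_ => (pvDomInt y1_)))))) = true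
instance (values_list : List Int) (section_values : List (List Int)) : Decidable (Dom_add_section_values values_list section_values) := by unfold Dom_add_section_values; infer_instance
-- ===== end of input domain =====

-- B replaces A's iterative buffer accumulation by structural recursion returning
-- (total, segment) pairs built back-to-front; both mutate values_list in place —
-- the equivalence proved here is about the RETURN value only.

-- ===== PORT A =====
-- A's loop carries (new_values, total_section_trades); the return value is the total.
def add_section_values (values_list : List Int) (section_values : List (List Int)) : Int :=
  let st := section_values.foldl
    (fun (st : List Int × Int) hs2_group =>
      let nv := st.1 ++ [hs2_group.sum]
      let tot := st.2 + hs2_group.sum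
      let nv := hs2_group.foldl (fun acc trade_value => acc ++ [trade_value]) nv
      (nv, tot))
    ([], 0)
  st.2

-- ===== PORT B =====
-- B's recursive helper `segment`: returns (total, appended segment).
def pvSegment_add_section_values : List (List Int) → Int × List Int
  | [] => (0, [])
  | g :: gs =>
    let r := pvSegment_add_section_values gs
    (g.sum + r.1, g.sum :: (g ++ r.2))

def add_section_values_alt (values_list : List Int) (section_values : List (List Int)) : Int :=
  (pvSegment_add_section_values section_values).1

-- ===== PRECONDITION & SPEC =====
def Spec_add_section_values (values_list : List Int) (section_values : List (List Int)) (out : Int) : Prop := out = add_section_values_alt values_list section_values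
instance (values_list : List Int) (section_values : List (List Int)) (out : Int) : Decidable (Spec_add_section_values values_list section_values out) := by unfold Spec_add_section_values; infer_instance

-- ===== CLAIM =====
def Claim_equal_add_section_values : Prop := ∀ (values_list : List Int) (section_values : List (List Int)), Dom_add_section_values values_list section_values → Spec_add_section_values values_list section_values (add_section_values values_list section_values)

-- ===== LEMMAS AND PROOFS =====

-- The second component of A's fold is the running total, independent of the buffer.
theorem add_section_values_snd (section_values : List (List Int)) (nv : List Int) (t : Int) :
    (section_values.foldl
      (fun (st : List Int × Int) hs2_group =>
        let nv := st.1 ++ [hs2_group.sum]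
        let tot := st.2 + hs2_group.sum
        let nv := hs2_group.foldl (fun acc trade_value => acc ++ [trade_value]) nv
        (nv, tot))
      (nv, t)).2 = t + (section_values.map (fun g => g.sum)).sum := by
  induction section_values generalizing nv t with
  | nil => simp
  | cons g gs ih =>
    simp only [List.foldl_cons, List.map_cons, List.sum_cons]
    rw [ih]; ring

-- B's recursive total equals the sum of the per-group sums.
theorem pvSegment_fst (l : List (List Int)) :
    (pvSegment_add_section_values l).1 = (l.map (fun g => g.sum)).sum := by
  induction l with
  | nil => simp [pvSegment_add_section_values]
  | cons g gs ih => simp [pvSegment_add_section_values, ih]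

-- ===== VERDICT =====
theorem add_section_values_spec : Claim_equal_add_section_values := by
  intro values_list section_values _
  unfold Spec_add_section_values add_section_values add_section_values_alt
  rw [pvSegment_fst]
  simpa using add_section_values_snd section_values [] 0
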